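-- pv_equiv track=rewrite | github.com/ejodude/taxonomer_parsing | process_classifier_count.py | process_individual_classify_file
-- ===== SOURCE A (Python) =====
-- import copy
--
-- def process_individual_classify_file( data ):
-- 	"""
-- 	#iterates over file and counts the number of times a read is
-- 	#classfied to each unique ID number. This loop parses output from single
-- 	#classfier database run.
--
-- 	data - taxonomer object data structure with returned classified lines in list format
-- 	id_dict - parsed key file results with counter for read count tracking
-- 	"""
-- 	#print data
-- 	#pull results from itertools
-- 	results = data[0]
-- 	id_dict = data[1]
--
-- 	#process the object and append counters
-- 	RV = copy.deepcopy(id_dict) #dictionary of returned results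
-- 	for result in results: #iterate over lines.
-- 		result = result.split("\t")
-- 		taxid = result[2]
-- 		RV[ taxid ][1] += 1
--
-- 	return( RV ) #return modified dictioanry with updated counts
-- ===== SOURCE B (Python) =====
-- def process_individual_classify_file(data):
--     results, id_dict = data
--     taxids = [r.split("\t")[2] for r in results]
--     # build the result afresh: one output entry per id_dict entry, its counter
--     # bumped by how many classified lines carry that taxid
--     return {k: v[:1] + [v[1] + taxids.count(k)] + v[2:] if k in taxids else v[:]
--             for k, v in id_dict.items()}
-- ===== Notes on version B (the rewrite author's own statement) =====
-- stated objective: alternative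
-- what changed: B inverts the traversal: instead of streaming over the result lines and incrementing a deep-copied dict entry per line, it builds the output dict afresh by one comprehension over id_dict.items(), computing each key's total increment with taxids.count(k) (a per-key scan of the extracted taxid list); no copy, no mutation, no incremental counting.
import Mathlib
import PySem

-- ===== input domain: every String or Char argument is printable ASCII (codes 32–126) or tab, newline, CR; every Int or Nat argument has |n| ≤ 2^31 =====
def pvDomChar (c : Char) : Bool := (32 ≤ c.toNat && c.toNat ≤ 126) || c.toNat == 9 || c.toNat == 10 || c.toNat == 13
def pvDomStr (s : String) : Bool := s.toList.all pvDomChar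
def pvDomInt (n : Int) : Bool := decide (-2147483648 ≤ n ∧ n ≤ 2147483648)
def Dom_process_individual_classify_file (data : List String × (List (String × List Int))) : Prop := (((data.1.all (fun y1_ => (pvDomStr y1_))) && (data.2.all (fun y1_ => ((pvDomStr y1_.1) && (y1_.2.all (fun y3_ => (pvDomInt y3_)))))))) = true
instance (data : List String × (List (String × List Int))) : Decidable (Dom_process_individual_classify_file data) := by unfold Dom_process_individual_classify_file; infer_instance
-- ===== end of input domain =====

-- B inverts the traversal: one comprehension over id_dict.items() building the output afresh,
-- bumping each entry by taxids.count(k), instead of A's per-line increment into a deep copy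
-- (objective: alternative decomposition; return-value equivalence — neither mutates its input).

-- ===== PORT A =====
def process_individual_classify_file (data : List String × (List (String × List Int))) : List (String × List Int) :=
  let results := data.1
  let id_dict : PySem.Dict String (List Int) := PySem.Dict.ofList data.2
  -- RV = copy.deepcopy(id_dict); for result in results: result = result.split("\t"); taxid = result[2]; RV[taxid][1] += 1
  let RV := results.foldl (fun RV result =>
    let fields := (PySem.Str.split? result "\t").getD []
    let taxid := PySem.List.pyGetD fields 2 ""
    let l := RV.getD taxid []
    RV.insert taxid (PySem.List.pySetD l 1 (PySem.List.pyGetD l 1 0 + 1))) id_dict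
  RV.items

-- ===== PORT B =====
def process_individual_classify_file_alt (data : List String × (List (String × List Int))) : List (String × List Int) :=
  -- taxids = [r.split("\t")[2] for r in results]
  let taxids := data.1.map (fun r => PySem.List.pyGetD ((PySem.Str.split? r "\t").getD []) 2 "")
  -- {k: v[:1] + [v[1] + taxids.count(k)] + v[2:] if k in taxids else v[:] for k, v in id_dict.items()}
  -- (v[1] is exact under Pre_, which guarantees len(v) ≥ 2 whenever k occurs in taxids)
  (PySem.Dict.ofList data.2).items.map (fun kv =>
    (kv.1,
      if taxids.contains kv.1 then
        PySem.List.slice kv.2 none (some 1)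
          ++ [PySem.List.pyGetD kv.2 1 0 + (taxids.count kv.1 : Int)]
          ++ PySem.List.slice kv.2 (some 2) none
      else PySem.List.slice kv.2 none none))

-- ===== PRECONDITION & SPEC =====
-- Pre_ excludes exactly the inputs on which Python A raises: a line with fewer than three
-- tab-separated fields (IndexError), a taxid absent from id_dict (KeyError), or a hit value
-- list of length < 2 (IndexError on [1]).
def Pre_process_individual_classify_file (data : List String × (List (String × List Int))) : Prop :=
  (data.1.all (fun r =>
    let f := (PySem.Str.split? r "\t").getD []
    decide (3 ≤ f.length) &&
    (match (PySem.Dict.ofList data.2).get? (PySem.List.pyGetD f 2 "") with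
     | some l => decide (2 ≤ l.length)
     | none => false))) = true
instance (data : List String × (List (String × List Int))) : Decidable (Pre_process_individual_classify_file data) := by unfold Pre_process_individual_classify_file; infer_instance

def pvWitness_process_individual_classify_file : (List String × (List (String × List Int))) :=
  (["r1\tC\tk7", "r2\tC\tk7"], [("k7", [0, 0]), ("k9", [1, 4])])

def Spec_process_individual_classify_file (data : List String × (List (String × List Int))) (out : List (String × List Int)) : Prop := out = process_individual_classify_file_alt data
instance (data : List String × (List (String × List Int))) (out : List (String × List Int)) : Decidable (Spec_process_individual_classify_file data out) := by unfold Spec_process_individual_classify_file; infer_instance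

-- ===== CLAIM (what is proved, stated in full; the proofs are below) =====
def Claim_equal_process_individual_classify_file : Prop := ∀ (data : List String × (List (String × List Int))), Dom_process_individual_classify_file data → Pre_process_individual_classify_file data → Spec_process_individual_classify_file data (process_individual_classify_file data)

-- ===== LEMMAS AND PROOFS =====

-- the taxid of a result line
def pvTax (r : String) : String := PySem.List.pyGetD ((PySem.Str.split? r "\t").getD []) 2 ""

-- 'l[1] += c' as a pure function (identity when the list is too short)
def pvBump (l : List Int) (c : Int) : List Int :=
  PySem.List.pySetD l 1 (PySem.List.pyGetD l 1 0 + c)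

-- one iteration of A's loop
def pvStep1 (D : PySem.Dict String (List Int)) (t : String) : PySem.Dict String (List Int) :=
  D.insert t (pvBump (D.getD t []) 1)

theorem pvBump_zero (l : List Int) : pvBump l 0 = l := by
  match l with
  | [] => rfl
  | [x] => rfl
  | x :: y :: rest =>
    simp [pvBump, PySem.List.pySetD, PySem.List.pySet?, PySem.List.pyGetD, PySem.List.pyGet?,
      PySem.List.pyIdx?]

theorem pvBump_bump (l : List Int) (a b : Int) : pvBump (pvBump l a) b = pvBump l (a + b) := by
  match l with
  | [] => rfl
  | [x] => rfl
  | x :: y :: rest =>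
    simp [pvBump, PySem.List.pySetD, PySem.List.pySet?, PySem.List.pyGetD, PySem.List.pyGet?,
      PySem.List.pyIdx?]
    ring

theorem pvBump_of_two_le (l : List Int) (c : Int) (h : 2 ≤ l.length) :
    PySem.List.slice l none (some 1) ++ [PySem.List.pyGetD l 1 0 + c]
      ++ PySem.List.slice l (some 2) none = pvBump l c := by
  match l with
  | [] => simp at h
  | [x] => simp at h
  | x :: y :: rest =>
    have h1 : PySem.List.slice (x :: y :: rest) none (some 1) = [x] := by
      rw [show (1 : Int) = ((1 : Nat) : Int) by norm_num, PySem.List.slice_to_natCast]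
      rfl
    have h2 : PySem.List.slice (x :: y :: rest) (some 2) none = rest := by
      rw [show (2 : Int) = ((2 : Nat) : Int) by norm_num, PySem.List.slice_from_natCast]
      rfl
    rw [h1, h2]
    simp [pvBump, PySem.List.pySetD, PySem.List.pySet?, PySem.List.pyGetD, PySem.List.pyGet?,
      PySem.List.pyIdx?]

-- A's whole loop, characterised pointwise over the initial dict's items
theorem pvFoldl_items (ts : List String) (D : PySem.Dict String (List Int))
    (hnd : D.keys.Nodup) (hc : ∀ t ∈ ts, D.contains t = true) :
    (ts.foldl pvStep1 D).items =
      D.items.map (fun kv => (kv.1, pvBump kv.2 (ts.count kv.1 : Int))) := by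
  induction ts generalizing D with
  | nil =>
    simp only [List.foldl_nil, List.count_nil, Int.natCast_zero, pvBump_zero]
    simp
  | cons t ts ih =>
    have hct : D.contains t = true := hc t (by simp)
    have hnd' : (pvStep1 D t).keys.Nodup := PySem.Dict.nodup_keys_insert D t _ hnd
    have hc' : ∀ u ∈ ts, (pvStep1 D t).contains u = true := by
      intro u hu
      simp [pvStep1, PySem.Dict.contains_insert, hc u (by simp [hu])]
    rw [List.foldl_cons, ih (pvStep1 D t) hnd' hc']
    rw [show (pvStep1 D t).items
        = D.items.map (fun p => if p.1 == t then (t, pvBump (D.getD t []) 1) else p) from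
      PySem.Dict.items_insert_of_contains D _ hct]
    rw [List.map_map]
    apply List.map_congr_left
    intro kv hkv
    simp only [Function.comp]
    by_cases hkt : kv.1 = t
    · subst hkt
      have hgd : D.getD kv.1 [] = kv.2 := PySem.Dict.getD_of_mem_items D hkv hnd []
      simp only [beq_self_eq_true, if_true, hgd, pvBump_bump, List.count_cons_self]
      congr 2
      push_cast
      ring
    · have hb : (kv.1 == t) = false := by simp [hkt]
      simp only [hb, if_neg Bool.false_ne_true]
      rw [List.count_cons_of_ne (fun h => hkt h.symm)]

-- membership in taxids means Pre_ vouches for the key: present with a value of length ≥ 2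
theorem pvPre_mem (data : List String × (List (String × List Int)))
    (hpre : Pre_process_individual_classify_file data) (t : String)
    (ht : t ∈ data.1.map pvTax) :
    ∃ l, (PySem.Dict.ofList data.2).get? t = some l ∧ 2 ≤ l.length := by
  obtain ⟨r, hr, hrt⟩ := List.mem_map.mp ht
  unfold Pre_process_individual_classify_file at hpre
  have := (List.all_eq_true.mp hpre) r hr
  simp only [Bool.and_eq_true] at this
  rcases this with ⟨-, h2⟩
  revert h2
  rw [show PySem.List.pyGetD ((PySem.Str.split? r "\t").getD []) 2 "" = pvTax r from rfl, hrt]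
  cases hget : (PySem.Dict.ofList data.2).get? t with
  | none => intro h; exact absurd h (by simp)
  | some l => intro h; exact ⟨l, rfl, by simpa using h⟩

-- A, rewritten as a fold of pvStep1 over the extracted taxids
theorem pvA_eq (data : List String × (List (String × List Int))) :
    process_individual_classify_file data =
      ((data.1.map pvTax).foldl pvStep1 (PySem.Dict.ofList data.2)).items := by
  simp only [process_individual_classify_file, List.foldl_map]
  rfl

-- B, with pvTax folded back in
theorem pvB_eq (data : List String × (List (String × List Int))) :
    process_individual_classify_file_alt data =
      (PySem.Dict.ofList data.2).items.map (fun kv =>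
        (kv.1,
          if (data.1.map pvTax).contains kv.1 = true then
            PySem.List.slice kv.2 none (some 1)
              ++ [PySem.List.pyGetD kv.2 1 0 + ((data.1.map pvTax).count kv.1 : Int)]
              ++ PySem.List.slice kv.2 (some 2) none
          else PySem.List.slice kv.2 none none)) := rfl

-- ===== VERDICT (by name: the statement is the Claim_ definition above) =====
theorem process_individual_classify_file_spec : Claim_equal_process_individual_classify_file := by
  intro data _ hpre
  unfold Spec_process_individual_classify_file
  rw [pvA_eq, pvB_eq]
  have hnd : (PySem.Dict.ofList data.2).keys.Nodup := PySem.Dict.nodup_keys_ofList data.2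
  have hc : ∀ t ∈ data.1.map pvTax, (PySem.Dict.ofList data.2).contains t = true := by
    intro t ht
    obtain ⟨l, hget, -⟩ := pvPre_mem data hpre t ht
    rw [PySem.Dict.contains_eq_isSome_get?, hget]
    rfl
  rw [pvFoldl_items (data.1.map pvTax) _ hnd hc]
  apply List.map_congr_left
  intro kv hkv
  by_cases hm : (data.1.map pvTax).contains kv.1 = true
  · obtain ⟨l, hget, hlen⟩ := pvPre_mem data hpre kv.1 (by simpa using hm)
    have hl : l = kv.2 := by
      have h := PySem.Dict.get?_of_mem_items (PySem.Dict.ofList data.2) hkv hnd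
      rw [hget] at h
      exact Option.some.inj h
    subst hl
    rw [if_pos hm, pvBump_of_two_le kv.2 _ hlen]
  · have hcount : (data.1.map pvTax).count kv.1 = 0 :=
      List.count_eq_zero.mpr (by simpa using hm)
    rw [if_neg hm, PySem.List.slice_none_none, hcount]
    simp [pvBump_zero]
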